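-- pv_equiv track=rewrite | github.com/LucasMarianoVieira/CPrefSQLGen | gen.py | gen_rules
-- ===== SOURCE A (Python) =====
-- MAX_VALUE = 0
--
-- RULE_STRING = 'IF A1 = {c1} AND A2 = {c2} THEN A3 = {b} BETTER A3 = {w} {i}'
--
-- def gen_rule(rule_dict):
--     '''
--     Convert rule dictionary into rule in string format
--     '''
--     return RULE_STRING.format(c1=rule_dict['COND1'],
--                               c2=rule_dict['COND2'],
--                               b=rule_dict['BEST'],
--                               w=rule_dict['WORST'],
--                               i=rule_dict['INDIFF'])
--
-- def gen_rules(n_rules, level, ind):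
--     '''
--     Generate preference rules
--     '''
--     # Preference level
--     current_level = 0
--     # Values for attributes of rule condition
--     cond1 = 1
--     cond2 = 1
--     # Preferred value
--     pref_value = 1
--     # Indifferent attributes
--     indiff_list = []
--     # Build list of indifferent attributes
--     indiff_str = ''
--     # First indiferent attribute
--     ind_start=4;
--     if ind > 0:
--         # Indifferent attributes start in A4
--         for att_cont in range(ind):
--             indiff_list.append('A' + str(att_cont + ind_start))
--         indiff_str = '[' + ', '.join(indiff_list) + ']'
--     # Build rules list
--     rules_list = []
--     for _ in range(n_rules):
--         rule_dict = {}
--         rule_dict['COND1'] = cond1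
--         rule_dict['COND2'] = cond2
--         rule_dict['BEST'] = pref_value
--         pref_value += 1
--         rule_dict['WORST'] = pref_value
--         current_level += 1
--         # Check if maximum level have been reached
--         if current_level == level:
--             current_level = 0
--             pref_value = 1
--             cond2 += 1
--         # Check if maximum values have been reached
--         if cond2 > MAX_VALUE:
--             cond1 += 1
--             if cond1 > MAX_VALUE:
--                 cond1 = 1
--             cond2 = 1
--         rule_dict['INDIFF'] = indiff_str
--         rules_list.append(gen_rule(rule_dict))
--     return rules_list
-- ===== SOURCE B (Python) =====
-- RULE_STRING = 'IF A1 = {c1} AND A2 = {c2} THEN A3 = {b} BETTER A3 = {w} {i}'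
--
-- def gen_rules(n_rules, level, ind):
--     '''
--     Generate preference rules (closed-form per-index version)
--     '''
--     indiff_str = ''
--     if ind > 0:
--         indiff_str = '[' + ', '.join('A' + str(k + 4) for k in range(ind)) + ']'
--     rules_list = []
--     for i in range(n_rules):
--         best = i % level + 1 if level >= 1 else i + 1
--         rules_list.append(RULE_STRING.format(c1=1, c2=1, b=best, w=best + 1,
--                                              i=indiff_str))
--     return rules_list
-- ===== Notes on version B (the rewrite author's own statement) =====
-- stated objective: simpler
-- what changed: Replaces A's mutable state machine (cond1/cond2/pref_value/current_level with reset logic) by a direct per-index closed form: cond values are provably always 1 (MAX_VALUE=0 collapses the cond branches) and BEST is i % level + 1 when level >= 1, else i + 1; the indifference string is built once with a join over a generator.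
import Mathlib
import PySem

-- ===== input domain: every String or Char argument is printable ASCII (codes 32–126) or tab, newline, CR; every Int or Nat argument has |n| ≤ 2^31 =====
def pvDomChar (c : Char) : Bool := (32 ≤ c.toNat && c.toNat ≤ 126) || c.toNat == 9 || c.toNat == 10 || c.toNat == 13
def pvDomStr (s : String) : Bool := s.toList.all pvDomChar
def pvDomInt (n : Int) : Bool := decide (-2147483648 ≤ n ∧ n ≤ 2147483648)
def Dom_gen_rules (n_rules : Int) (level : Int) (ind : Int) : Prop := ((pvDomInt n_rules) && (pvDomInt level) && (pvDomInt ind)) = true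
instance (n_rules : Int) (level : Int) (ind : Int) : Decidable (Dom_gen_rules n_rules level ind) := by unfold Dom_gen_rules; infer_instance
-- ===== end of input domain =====

-- B replaces A's mutable counter state machine by a per-index closed form (simpler; same cost).

-- ===== PORT A =====
def MAX_VALUE : Int := 0

-- RULE_STRING.format(c1=…, c2=…, b=…, w=…, i=…) for int conds/values and a string i
def gen_rule (c1 : Int) (c2 : Int) (b : Int) (w : Int) (i : String) : String :=
  "IF A1 = " ++ PySem.Int.toStr c1 ++ " AND A2 = " ++ PySem.Int.toStr c2 ++
  " THEN A3 = " ++ PySem.Int.toStr b ++ " BETTER A3 = " ++ PySem.Int.toStr w ++ " " ++ i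

-- the body of A's 'for _ in range(n_rules)' loop; state = (cond1, cond2, pref_value, current_level, rules_list)
def gen_rules_step (level : Int) (indiff_str : String)
    (s : Int × Int × Int × Int × List String) (_ : Int) :
    Int × Int × Int × Int × List String :=
  let cond1 := s.1
  let cond2 := s.2.1
  let pref_value := s.2.2.1
  let current_level := s.2.2.2.1
  let rules_list := s.2.2.2.2
  let best := pref_value
  let pref_value := pref_value + 1
  let worst := pref_value
  let current_level := current_level + 1
  -- if current_level == level: current_level = 0; pref_value = 1; cond2 += 1
  let t := if current_level = level then ((0:Int), (1:Int), cond2 + 1)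
           else (current_level, pref_value, cond2)
  let current_level := t.1
  let pref_value := t.2.1
  let cond2 := t.2.2
  -- if cond2 > MAX_VALUE: cond1 += 1; if cond1 > MAX_VALUE: cond1 = 1; cond2 = 1
  let u := if cond2 > MAX_VALUE then
             (let c1 := cond1 + 1
              (if c1 > MAX_VALUE then (1:Int) else c1, (1:Int)))
           else (cond1, cond2)
  let cond1 := u.1
  let cond2 := u.2
  (cond1, cond2, pref_value, current_level,
    rules_list ++ [gen_rule s.1 s.2.1 best worst indiff_str])

def gen_rules (n_rules : Int) (level : Int) (ind : Int) : List String :=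
  let indiff_str : String :=
    if ind > 0 then
      let indiff_list := (PySem.List.pyRange 0 ind 1).foldl
        (fun l att_cont => l ++ ["A" ++ PySem.Int.toStr (att_cont + 4)]) []
      "[" ++ PySem.Str.join ", " indiff_list ++ "]"
    else ""
  ((PySem.List.pyRange 0 n_rules 1).foldl (gen_rules_step level indiff_str)
    (1, 1, 1, 0, [])).2.2.2.2

-- ===== PORT B =====
def gen_rule_alt (c1 : Int) (c2 : Int) (b : Int) (w : Int) (i : String) : String :=
  "IF A1 = " ++ PySem.Int.toStr c1 ++ " AND A2 = " ++ PySem.Int.toStr c2 ++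
  " THEN A3 = " ++ PySem.Int.toStr b ++ " BETTER A3 = " ++ PySem.Int.toStr w ++ " " ++ i

def gen_rules_alt (n_rules : Int) (level : Int) (ind : Int) : List String :=
  let indiff_str : String :=
    if ind > 0 then
      "[" ++ PySem.Str.join ", "
        ((PySem.List.pyRange 0 ind 1).map (fun k => "A" ++ PySem.Int.toStr (k + 4))) ++ "]"
    else ""
  (PySem.List.pyRange 0 n_rules 1).map (fun i =>
    let best := if level ≥ 1 then PySem.Int.mod i level + 1 else i + 1
    gen_rule_alt 1 1 best (best + 1) indiff_str)

-- ===== PRECONDITION & SPEC =====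
def Spec_gen_rules (n_rules : Int) (level : Int) (ind : Int) (out : List String) : Prop := out = gen_rules_alt n_rules level ind
instance (n_rules : Int) (level : Int) (ind : Int) (out : List String) : Decidable (Spec_gen_rules n_rules level ind out) := by unfold Spec_gen_rules; infer_instance

-- ===== CLAIM (what is proved, stated in full; the proofs are below) =====
def Claim_equal_gen_rules : Prop := ∀ (n_rules : Int) (level : Int) (ind : Int), Dom_gen_rules n_rules level ind → Spec_gen_rules n_rules level ind (gen_rules n_rules level ind)

-- ===== LEMMAS AND PROOFS =====

-- A builds the indifferent-attribute list by repeated append; that is a map.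
theorem foldl_snoc_eq_map {α β : Type} (f : α → β) :
    ∀ (xs : List α) (acc : List β),
      xs.foldl (fun l x => l ++ [f x]) acc = acc ++ xs.map f := by
  intro xs
  induction xs with
  | nil => intro acc; simp
  | cons x xs ih => intro acc; simp [List.foldl, ih]

-- closed form of A's loop state after k iterations
theorem gen_rules_inv (level : Int) (ind_str : String) (k : Nat) :
    (PySem.List.pyRange 0 (k : Int) 1).foldl (gen_rules_step level ind_str)
        (1, 1, 1, 0, []) =
      (1, 1,
       (if level ≥ 1 then (k : Int) % level + 1 else (k : Int) + 1),
       (if level ≥ 1 then (k : Int) % level else (k : Int)),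
       (PySem.List.pyRange 0 (k : Int) 1).map (fun i =>
         gen_rule 1 1 (if level ≥ 1 then i % level + 1 else i + 1)
           ((if level ≥ 1 then i % level + 1 else i + 1) + 1) ind_str)) := by
  induction k with
  | zero =>
    by_cases h : level ≥ 1 <;>
      simp [PySem.List.pyRange_one_eq_nil (le_refl (0:Int)), h]
  | succ k ih =>
    have hk : (0:Int) ≤ (k : Int) := Int.natCast_nonneg k
    have hsplit : PySem.List.pyRange 0 ((k:Int) + 1) 1 =
        PySem.List.pyRange 0 (k:Int) 1 ++ [(k:Int)] :=
      PySem.List.pyRange_one_succ_right hk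
    push_cast
    rw [hsplit, List.foldl_append, ih, List.map_append]
    by_cases hl : level ≥ 1
    · -- level ≥ 1 : residue arithmetic
      have h0 : 0 ≤ (k:Int) % level := Int.emod_nonneg _ (by omega)
      have h1 : (k:Int) % level < level := Int.emod_lt_of_pos _ (by omega)
      have hdecomp : ((k:Int) + 1) % level = ((k:Int) % level + 1) % level := by
        conv_lhs => rw [← Int.mul_ediv_add_emod (k:Int) level]
        rw [(by ring : level * ((k:Int) / level) + (k:Int) % level + 1
              = ((k:Int) % level + 1) + level * ((k:Int) / level)),
            Int.add_mul_emod_self_left]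
      by_cases hreset : (k:Int) % level + 1 = level
      · have hmod : ((k:Int) + 1) % level = 0 := by
          rw [hdecomp, hreset, Int.emod_self]
        simp [gen_rules_step, MAX_VALUE, hl, hreset, hmod, List.foldl]
      · have hlt : (k:Int) % level + 1 < level := by omega
        have hmod : ((k:Int) + 1) % level = (k:Int) % level + 1 := by
          rw [hdecomp, Int.emod_eq_of_lt (by omega) hlt]
        simp only [gen_rules_step, MAX_VALUE, hl, List.foldl]
        simp [hreset, hmod]
    · -- level ≤ 0 : the reset branch never fires
      have hne : (k:Int) + 1 ≠ level := by omega
      simp [gen_rules_step, MAX_VALUE, hl, hne, List.foldl]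

theorem gen_rules_spec : Claim_equal_gen_rules := by
  intro n_rules level ind _
  unfold Spec_gen_rules gen_rules gen_rules_alt
  -- the two indifference strings coincide
  rw [foldl_snoc_eq_map]
  simp only [List.nil_append]
  by_cases hn : 0 ≤ n_rules
  · obtain ⟨k, hk⟩ := Int.eq_ofNat_of_zero_le hn
    subst hk
    rw [gen_rules_inv]
    apply List.map_congr_left
    intro i hi
    have hi0 : 0 ≤ i := (PySem.List.mem_pyRange_one.mp hi).1
    by_cases hl : level ≥ 1
    · have hlp : (0:Int) < level := by omega
      have : PySem.Int.mod i level = i % level :=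
        PySem.Int.mod_eq_emod_of_pos (a := i) (b := level) hlp
      simp [hl, this, gen_rule, gen_rule_alt]
    · simp [hl, gen_rule, gen_rule_alt]
  · simp [PySem.List.pyRange_one_eq_nil (show n_rules ≤ (0:Int) by omega)]
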